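-- pv_equiv track=rewrite | github.com/NurullahGundogdu/Image-Processing | Project_2/Part_1 Median Filter/median_filter.py | lexicographical_ordering
-- ===== SOURCE A (Python) =====
-- def lexicographical_ordering(red_values, green_values, blue_values) : # 2 tane parametre alıcak pixel_1 ve pixel_2
--
-- 	pixels_values = []
--
-- 	for i in range(len(red_values)):
-- 		pixels_values.append([red_values[i], green_values[i], blue_values[i]])
--
--
-- 	for i in range(len(pixels_values)):
--
-- 		for j in range(i + 1,len(pixels_values)):
--
-- 			if pixels_values[i][0] > pixels_values[j][0] :
-- 				pixels_values[i], pixels_values[j] = pixels_values[j], pixels_values[i]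
--
-- 			elif pixels_values[i][0] == pixels_values[j][0]:
--
-- 				if pixels_values[i][1] > pixels_values[j][1] :
-- 					pixels_values[i], pixels_values[j] = pixels_values[j], pixels_values[i]
--
-- 				elif pixels_values[i][1] == pixels_values[j][1]:
-- 					if pixels_values[i][2] > pixels_values[j][2] :
-- 						pixels_values[i], pixels_values[j] = pixels_values[j], pixels_values[i]
--
--
--
-- 	return tuple(pixels_values[len(pixels_values) // 2])
-- ===== SOURCE B (Python) =====
-- def lexicographical_ordering(red_values, green_values, blue_values):
--     # Quickselect for the median triple instead of A's O(n^2) exchange sort.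
--     pixels = list(zip(red_values, green_values, blue_values))
--     k = len(pixels) // 2
--     while True:
--         pivot = pixels[0]  # IndexError on empty input, like A
--         less = [p for p in pixels if p < pivot]
--         if k < len(less):
--             pixels = less
--             continue
--         greater = [p for p in pixels if p > pivot]
--         nle = len(pixels) - len(greater)
--         if k < nle:
--             return pivot
--         pixels, k = greater, k - nle
-- ===== Notes on version B (the rewrite author's own statement) =====
-- stated objective: faster
-- what changed: Replaces A's O(n^2) in-place exchange sort followed by taking the middle element with a quickselect that partitions the triples into less/equal/greater buckets and descends into the bucket containing index n//2.
import Mathlib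
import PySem

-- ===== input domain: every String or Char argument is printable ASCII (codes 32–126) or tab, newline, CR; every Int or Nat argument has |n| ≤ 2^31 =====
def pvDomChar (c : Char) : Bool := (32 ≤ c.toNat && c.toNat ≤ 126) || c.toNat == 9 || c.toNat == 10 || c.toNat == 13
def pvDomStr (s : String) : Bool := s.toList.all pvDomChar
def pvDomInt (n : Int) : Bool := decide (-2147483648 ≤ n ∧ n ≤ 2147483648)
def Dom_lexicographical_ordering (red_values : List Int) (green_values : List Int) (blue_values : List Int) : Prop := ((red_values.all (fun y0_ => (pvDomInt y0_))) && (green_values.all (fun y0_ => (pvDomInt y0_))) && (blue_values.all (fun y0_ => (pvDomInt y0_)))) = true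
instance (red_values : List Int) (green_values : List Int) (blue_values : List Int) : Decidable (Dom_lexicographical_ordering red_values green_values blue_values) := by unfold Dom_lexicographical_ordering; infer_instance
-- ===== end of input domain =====

-- B replaces A's O(n^2) in-place exchange sort (followed by indexing the middle) with a
-- quickselect that partitions the triples into less/equal/greater buckets and descends
-- into the bucket containing index n//2 (measurably faster on the timing inputs).
-- A mutates nothing observable (it only builds and sorts a local list).

-- ===== PORT A =====

-- Python's strict lexicographic '<' on 3-tuples of ints (used by B; A compares field by field).
def pvLt (a b : Int × Int × Int) : Bool :=
  a.1 < b.1 || (a.1 == b.1 && (a.2.1 < b.2.1 || (a.2.1 == b.2.1 && a.2.2 < b.2.2)))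

-- body of A's inner loop: the three-way comparison chain, swapping pix[i] and pix[j]
def pvSwapStep (pix : List (Int × Int × Int)) (i j : Nat) : List (Int × Int × Int) :=
  let a := pix.getD i (0, 0, 0)
  let b := pix.getD j (0, 0, 0)
  if a.1 > b.1 then (pix.set i b).set j a
  else if a.1 = b.1 then
    if a.2.1 > b.2.1 then (pix.set i b).set j a
    else if a.2.1 = b.2.1 then
      if a.2.2 > b.2.2 then (pix.set i b).set j a
      else pix
    else pix
  else pix

def lexicographical_ordering (red_values : List Int) (green_values : List Int) (blue_values : List Int) : List Int :=
  -- pixels_values built by appending [r,g,b] for i in range(len(red_values))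
  let pixels := (List.range red_values.length).foldl
    (fun acc i => acc ++ [(red_values.getD i 0, green_values.getD i 0, blue_values.getD i 0)]) []
  let n := pixels.length
  -- the double loop of exchange sort
  let sorted := (List.range n).foldl
    (fun pix i => (List.range' (i + 1) (n - (i + 1))).foldl (fun pix j => pvSwapStep pix i j) pix) pixels
  let m := sorted.getD (sorted.length / 2) (0, 0, 0)
  [m.1, m.2.1, m.2.2]

-- ===== PORT B =====

theorem pvLt_self_false (a : Int × Int × Int) : pvLt a a = false := by
  simp [pvLt]

-- the while-True quickselect loop of Source B, as a tail recursion on the shrinking bucket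
def pvQsel (pix : List (Int × Int × Int)) (k : Nat) : Int × Int × Int :=
  match pix with
  | [] => (0, 0, 0)  -- Python raises IndexError here (only reachable on empty input, outside Pre_)
  | pivot :: rest =>
    let less := (pivot :: rest).filter (fun p => pvLt p pivot)
    if k < less.length then pvQsel less k
    else
      let greater := (pivot :: rest).filter (fun p => pvLt pivot p)
      let nle := (pivot :: rest).length - greater.length
      if k < nle then pivot
      else pvQsel greater (k - nle)
termination_by pix.length
decreasing_by
  · exact List.length_filter_lt_length_iff_exists.mpr
      ⟨pivot, List.mem_cons_self .., by simp [pvLt_self_false]⟩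
  · exact List.length_filter_lt_length_iff_exists.mpr
      ⟨pivot, List.mem_cons_self .., by simp [pvLt_self_false]⟩

def lexicographical_ordering_alt (red_values : List Int) (green_values : List Int) (blue_values : List Int) : List Int :=
  let pixels := red_values.zip (green_values.zip blue_values)
  let k := pixels.length / 2
  let m := pvQsel pixels k
  [m.1, m.2.1, m.2.2]

-- ===== PRECONDITION & SPEC =====
-- Pre_ excludes exactly the inputs where the Python A raises IndexError: empty red_values
-- (the final median index), or green/blue shorter than red (the building loop).
def Pre_lexicographical_ordering (red_values : List Int) (green_values : List Int) (blue_values : List Int) : Prop :=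
  red_values ≠ [] ∧ red_values.length ≤ green_values.length ∧ red_values.length ≤ blue_values.length
instance (red_values : List Int) (green_values : List Int) (blue_values : List Int) : Decidable (Pre_lexicographical_ordering red_values green_values blue_values) := by unfold Pre_lexicographical_ordering; infer_instance

def pvWitness_lexicographical_ordering : List Int × List Int × List Int := ([3, 1, 2], [0, 5, 5], [7, 1, 2])

def Spec_lexicographical_ordering (red_values : List Int) (green_values : List Int) (blue_values : List Int) (out : List Int) : Prop := out = lexicographical_ordering_alt red_values green_values blue_values
instance (red_values : List Int) (green_values : List Int) (blue_values : List Int) (out : List Int) : Decidable (Spec_lexicographical_ordering red_values green_values blue_values out) := by unfold Spec_lexicographical_ordering; infer_instance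

-- ===== CLAIM (what is proved, stated in full; the proofs are below) =====
def Claim_equal_lexicographical_ordering : Prop := ∀ (red_values : List Int) (green_values : List Int) (blue_values : List Int), Dom_lexicographical_ordering red_values green_values blue_values → Pre_lexicographical_ordering red_values green_values blue_values → Spec_lexicographical_ordering red_values green_values blue_values (lexicographical_ordering red_values green_values blue_values)

-- ===== LEMMAS AND PROOFS =====

theorem pvLt_antisymm {a b : Int × Int × Int} (h1 : pvLt a b = false) (h2 : pvLt b a = false) : a = b := by
  obtain ⟨a1, a2, a3⟩ := a; obtain ⟨b1, b2, b3⟩ := b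
  simp [pvLt] at h1 h2
  refine Prod.ext ?_ (Prod.ext ?_ ?_) <;> simp <;> omega

theorem pvLt_asymm {a b : Int × Int × Int} (h : pvLt a b = true) : pvLt b a = false := by
  obtain ⟨a1, a2, a3⟩ := a; obtain ⟨b1, b2, b3⟩ := b
  simp [pvLt] at h ⊢; omega

theorem pvLt_trans {a b c : Int × Int × Int} (h1 : pvLt a b = true) (h2 : pvLt b c = true) : pvLt a c = true := by
  obtain ⟨a1, a2, a3⟩ := a; obtain ⟨b1, b2, b3⟩ := b; obtain ⟨c1, c2, c3⟩ := c
  simp [pvLt] at h1 h2 ⊢; omega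

theorem pvLt_le_trans {a b c : Int × Int × Int} (h1 : pvLt a b = true) (h2 : pvLt c b = false) : pvLt a c = true := by
  obtain ⟨a1, a2, a3⟩ := a; obtain ⟨b1, b2, b3⟩ := b; obtain ⟨c1, c2, c3⟩ := c
  simp [pvLt] at h1 h2 ⊢; omega

-- one pass of A's inner loop, on the sublist starting at position i:
-- running minimum m, already-visited suffix part front, unvisited rest
def pvGo (m : Int × Int × Int) (front rest : List (Int × Int × Int)) :
    (Int × Int × Int) × List (Int × Int × Int) :=
  match rest with
  | [] => (m, front)
  | y :: ys => if pvLt y m then pvGo y (front ++ [m]) ys else pvGo m (front ++ [y]) ys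

theorem pvGo_length (m : Int × Int × Int) (front rest : List (Int × Int × Int)) :
    (pvGo m front rest).2.length = front.length + rest.length := by
  induction rest generalizing m front with
  | nil => simp [pvGo]
  | cons y ys ih => simp [pvGo]; split <;> simp [ih] <;> omega

-- recursive form of A's whole exchange sort (selection sort)
def pvSel (l : List (Int × Int × Int)) : List (Int × Int × Int) :=
  match l with
  | [] => []
  | x :: ys => (pvGo x [] ys).1 :: pvSel (pvGo x [] ys).2
termination_by l.length
decreasing_by simp [pvGo_length]

theorem pvSwapStep_eq (pix : List (Int × Int × Int)) (i j : Nat) :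
    pvSwapStep pix i j =
      if pvLt (pix.getD j (0,0,0)) (pix.getD i (0,0,0))
      then (pix.set i (pix.getD j (0,0,0))).set j (pix.getD i (0,0,0))
      else pix := by
  simp only [pvSwapStep, pvLt]
  split_ifs with h1 h2 h3 h4 h5 <;> simp_all <;> omega

theorem getD_append_len {α : Type} (pre : List α) (x : α) (t : List α) (d : α) :
    (pre ++ x :: t).getD pre.length d = x := by
  simp

theorem set_append_len {α : Type} (pre : List α) (x : α) (t : List α) (v : α) :
    (pre ++ x :: t).set pre.length v = pre ++ v :: t := by
  induction pre with
  | nil => simp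
  | cons p ps ih => simp [ih]

-- A's inner loop = pvGo, on the decomposition pre ++ m :: front ++ rest
theorem pvGo_spec (rest front : List (Int × Int × Int)) (m : Int × Int × Int)
    (pre : List (Int × Int × Int)) :
    (List.range' (pre.length + 1 + front.length) rest.length).foldl
        (fun p j => pvSwapStep p pre.length j) (pre ++ m :: front ++ rest)
      = pre ++ (pvGo m front rest).1 :: (pvGo m front rest).2 := by
  induction rest generalizing front m with
  | nil => simp [pvGo]
  | cons y ys ih =>
    simp only [List.length_cons]
    rw [List.range'_succ, List.foldl_cons]
    have hgi : (pre ++ m :: front ++ y :: ys).getD pre.length (0,0,0) = m := by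
      rw [show pre ++ m :: front ++ y :: ys = pre ++ m :: (front ++ y :: ys) by simp]
      exact getD_append_len pre m (front ++ y :: ys) (0,0,0)
    have hgj : (pre ++ m :: front ++ y :: ys).getD (pre.length + 1 + front.length) (0,0,0) = y := by
      rw [show pre ++ m :: front ++ y :: ys = (pre ++ m :: front) ++ y :: ys by simp,
        show pre.length + 1 + front.length = (pre ++ m :: front).length by simp; omega]
      exact getD_append_len _ _ _ _
    rw [pvSwapStep_eq, hgi, hgj]
    by_cases hy : pvLt y m = true
    · rw [if_pos hy]
      have hset : ((pre ++ m :: front ++ y :: ys).set pre.length y).set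
          (pre.length + 1 + front.length) m = pre ++ y :: (front ++ [m]) ++ ys := by
        rw [show pre ++ m :: front ++ y :: ys = pre ++ m :: (front ++ y :: ys) by simp,
          set_append_len,
          show pre ++ y :: (front ++ y :: ys) = (pre ++ y :: front) ++ y :: ys by simp,
          show pre.length + 1 + front.length = (pre ++ y :: front).length by simp; omega,
          set_append_len]
        simp
      rw [hset]
      have hrec := ih (front ++ [m]) y
      rw [show pre.length + 1 + (front ++ [m]).length = pre.length + 1 + front.length + 1 by
        simp; omega] at hrec
      rw [hrec]
      simp only [pvGo, if_pos hy]
    · rw [if_neg (by simpa using hy)]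
      have hrec := ih (front ++ [y]) m
      rw [show pre.length + 1 + (front ++ [y]).length = pre.length + 1 + front.length + 1 by
        simp; omega] at hrec
      rw [show pre ++ m :: front ++ y :: ys = pre ++ m :: (front ++ [y]) ++ ys by simp]
      rw [hrec]
      simp only [pvGo]
      rw [if_neg (by simpa using hy)]

-- A's double loop = pvSel
theorem pvOuter_spec (pix : List (Int × Int × Int)) :
    ∀ (pre : List (Int × Int × Int)) (N : Nat), N = pre.length + pix.length →
    (List.range' pre.length pix.length).foldl
        (fun p i => (List.range' (i + 1) (N - (i + 1))).foldl (fun q j => pvSwapStep q i j) p)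
        (pre ++ pix)
      = pre ++ pvSel pix := by
  induction pix using pvSel.induct with
  | case1 => simp [pvSel]
  | case2 x ys ih =>
    intro pre N hN
    simp only [List.length_cons] at hN ⊢
    rw [List.range'_succ, List.foldl_cons]
    have hzs : (pvGo x [] ys).2.length = ys.length := by simpa using pvGo_length x [] ys
    have h1 : (List.range' (pre.length + 1) (N - (pre.length + 1))).foldl
        (fun q j => pvSwapStep q pre.length j) (pre ++ x :: ys)
        = pre ++ (pvGo x [] ys).1 :: (pvGo x [] ys).2 := by
      have := pvGo_spec ys [] x pre
      rw [show N - (pre.length + 1) = ys.length by omega]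
      simpa using this
    rw [h1]
    rw [show pre ++ (pvGo x [] ys).1 :: (pvGo x [] ys).2
        = (pre ++ [(pvGo x [] ys).1]) ++ (pvGo x [] ys).2 by simp]
    rw [show List.range' (pre.length + 1) ys.length
        = List.range' (pre ++ [(pvGo x [] ys).1]).length (pvGo x [] ys).2.length by
          simp [hzs]]
    rw [ih (pre ++ [(pvGo x [] ys).1]) N (by simp [hzs]; omega)]
    simp only [pvSel]
    simp

theorem pvGo_perm (rest front : List (Int × Int × Int)) (m : Int × Int × Int) :
    List.Perm ((pvGo m front rest).1 :: (pvGo m front rest).2) (m :: front ++ rest) := by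
  induction rest generalizing m front with
  | nil => simp [pvGo]
  | cons y ys ih =>
    simp only [pvGo]
    split
    · refine (ih _ _).trans ?_
      rw [List.perm_iff_count]; intro a
      simp [List.count_append, List.count_cons]; try omega
    · refine (ih _ _).trans ?_
      rw [List.perm_iff_count]; intro a
      simp [List.count_append, List.count_cons]; try omega

theorem pvGo_min (rest front : List (Int × Int × Int)) (m : Int × Int × Int)
    (hf : ∀ z ∈ front, pvLt z m = false) :
    (∀ z ∈ (pvGo m front rest).2, pvLt z (pvGo m front rest).1 = false) ∧
      pvLt m (pvGo m front rest).1 = false := by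
  induction rest generalizing m front with
  | nil => exact ⟨fun z hz => hf z hz, pvLt_self_false m⟩
  | cons y ys ih =>
    simp only [pvGo]
    split
    · rename_i hy
      have hf' : ∀ z ∈ front ++ [m], pvLt z y = false := by
        intro z hz
        rcases List.mem_append.1 hz with hz | hz
        · cases hzy : pvLt z y with
          | false => rfl
          | true =>
            have := pvLt_trans hzy hy
            rw [hf z hz] at this; exact absurd this (by simp)
        · simp at hz; subst hz; exact pvLt_asymm hy
      obtain ⟨h1, h2⟩ := ih (front ++ [m]) y hf'
      refine ⟨h1, ?_⟩
      cases hmy : pvLt m (pvGo y (front ++ [m]) ys).1 with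
      | false => rfl
      | true =>
        have := pvLt_le_trans hmy h2
        have h3 := pvLt_trans hy this
        rw [pvLt_self_false] at h3; exact absurd h3 (by simp)
    · rename_i hy
      have hf' : ∀ z ∈ front ++ [y], pvLt z m = false := by
        intro z hz
        rcases List.mem_append.1 hz with hz | hz
        · exact hf z hz
        · simp at hz; subst hz; simpa using hy
      exact ⟨(ih (front ++ [y]) m hf').1, (ih (front ++ [y]) m hf').2⟩

theorem pvSel_perm (l : List (Int × Int × Int)) : List.Perm (pvSel l) l := by
  induction l using pvSel.induct with
  | case1 => simp [pvSel]
  | case2 x ys ih =>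
    simp only [pvSel]
    exact (List.Perm.cons _ ih).trans (by simpa using pvGo_perm ys [] x)

theorem pvSel_sorted (l : List (Int × Int × Int)) :
    List.Pairwise (fun a b => pvLt b a = false) (pvSel l) := by
  induction l using pvSel.induct with
  | case1 => simp [pvSel]
  | case2 x ys ih =>
    simp only [pvSel]
    refine List.pairwise_cons.mpr ⟨?_, ih⟩
    intro b hb
    have hb' : b ∈ (pvGo x [] ys).2 := ((pvSel_perm _).mem_iff).1 hb
    exact (pvGo_min ys [] x (by simp)).1 b hb'

-- every element of the "equal" bucket is the pivot
theorem pvEq_filter_eq (l : List (Int × Int × Int)) (pivot : Int × Int × Int) :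
    ∀ z ∈ l.filter (fun p => !pvLt p pivot && !pvLt pivot p), z = pivot := by
  intro z hz
  obtain ⟨-, hp⟩ := List.mem_filter.1 hz
  simp only [Bool.and_eq_true, Bool.not_eq_true'] at hp
  exact pvLt_antisymm hp.1 hp.2

-- l splits into the three pivot buckets
theorem pvPartition_perm (l : List (Int × Int × Int)) (pivot : Int × Int × Int) :
    List.Perm l (l.filter (fun p => pvLt p pivot) ++
      (l.filter (fun p => !pvLt p pivot && !pvLt pivot p) ++ l.filter (fun p => pvLt pivot p))) := by
  rw [List.perm_iff_count]
  intro a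
  have hcf : ∀ (p : (Int × Int × Int) → Bool), p a = false → (l.filter p).count a = 0 := by
    intro p hp
    refine List.count_eq_zero.mpr fun hm => ?_
    have := (List.mem_filter.1 hm).2
    rw [hp] at this; exact absurd this (by simp)
  simp only [List.count_append]
  cases h1 : pvLt a pivot <;> cases h2 : pvLt pivot a
  · rw [hcf (fun p => pvLt p pivot) (by simp [h1]),
      hcf (fun p => pvLt pivot p) (by simp [h2]),
      List.count_filter (p := fun p => !pvLt p pivot && !pvLt pivot p) (by simp [h1, h2])]
    omega
  · rw [hcf (fun p => pvLt p pivot) (by simp [h1]),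
      hcf (fun p => !pvLt p pivot && !pvLt pivot p) (by simp [h2]),
      List.count_filter (p := fun p => pvLt pivot p) h2]
    omega
  · rw [hcf (fun p => pvLt pivot p) (by simp [h2]),
      hcf (fun p => !pvLt p pivot && !pvLt pivot p) (by simp [h1]),
      List.count_filter (p := fun p => pvLt p pivot) h1]
    omega
  · exact absurd h2 (by simp [pvLt_asymm h1])

theorem pvPartition_sorted (l : List (Int × Int × Int)) (pivot : Int × Int × Int) :
    List.Pairwise (fun a b => pvLt b a = false)
      (pvSel (l.filter (fun p => pvLt p pivot)) ++
        (l.filter (fun p => !pvLt p pivot && !pvLt pivot p) ++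
          pvSel (l.filter (fun p => pvLt pivot p)))) := by
  have hmemL : ∀ a ∈ pvSel (l.filter (fun p => pvLt p pivot)), pvLt a pivot = true := by
    intro a ha
    exact (List.mem_filter.1 ((pvSel_perm _).mem_iff.1 ha)).2
  have hmemG : ∀ a ∈ pvSel (l.filter (fun p => pvLt pivot p)), pvLt pivot a = true := by
    intro a ha
    exact (List.mem_filter.1 ((pvSel_perm _).mem_iff.1 ha)).2
  rw [List.pairwise_append]
  refine ⟨pvSel_sorted _, ?_, ?_⟩
  · rw [List.pairwise_append]
    refine ⟨?_, pvSel_sorted _, ?_⟩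
    · refine List.pairwise_of_forall_mem_list fun a ha b hb => ?_
      rw [pvEq_filter_eq l pivot a ha, pvEq_filter_eq l pivot b hb]
      exact pvLt_self_false pivot
    · intro a ha b hb
      rw [pvEq_filter_eq l pivot a ha]
      exact pvLt_asymm (hmemG b hb)
  · intro a ha b hb
    have hap := hmemL a ha
    rcases List.mem_append.1 hb with hb | hb
    · rw [pvEq_filter_eq l pivot b hb]
      exact pvLt_asymm hap
    · have hpb := hmemG b hb
      exact pvLt_asymm (pvLt_trans hap hpb)

theorem pvSel_partition (l : List (Int × Int × Int)) (pivot : Int × Int × Int) :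
    pvSel l = pvSel (l.filter (fun p => pvLt p pivot)) ++
      (l.filter (fun p => !pvLt p pivot && !pvLt pivot p) ++
        pvSel (l.filter (fun p => pvLt pivot p))) := by
  refine List.Perm.eq_of_pairwise (fun a b _ _ h1 h2 => pvLt_antisymm h2 h1)
    (pvSel_sorted l) (pvPartition_sorted l pivot) ?_
  refine (pvSel_perm l).trans ((pvPartition_perm l pivot).trans ?_)
  exact ((pvSel_perm _).symm.append ((List.Perm.refl _).append (pvSel_perm _).symm))

-- quickselect returns the k-th element of the sorted list
theorem pvQsel_eq_sel (l : List (Int × Int × Int)) (k : Nat) (hk : k < l.length) :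
    pvQsel l k = (pvSel l).getD k (0,0,0) := by
  induction l, k using pvQsel.induct with
  | case1 k => simp at hk
  | case2 k pivot rest less hlt ih =>
    have hlt' : k < ((pivot :: rest).filter (fun p => pvLt p pivot)).length := hlt
    have hL : (pvSel ((pivot :: rest).filter (fun p => pvLt p pivot))).length
        = ((pivot :: rest).filter (fun p => pvLt p pivot)).length := (pvSel_perm _).length_eq
    rw [pvQsel, if_pos hlt', ih hlt',
      pvSel_partition (pivot :: rest) pivot, List.getD_append _ _ _ _ (by omega)]
  | case3 k pivot rest less hlt greater nle hnle =>
    have hlt' : ¬ k < ((pivot :: rest).filter (fun p => pvLt p pivot)).length := hlt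
    have hnle' : k < (pivot :: rest).length
        - ((pivot :: rest).filter (fun p => pvLt pivot p)).length := hnle
    have hlens := (pvPartition_perm (pivot :: rest) pivot).length_eq
    simp only [List.length_append] at hlens
    have hL : (pvSel ((pivot :: rest).filter (fun p => pvLt p pivot))).length
        = ((pivot :: rest).filter (fun p => pvLt p pivot)).length := (pvSel_perm _).length_eq
    have hidx : k - (pvSel ((pivot :: rest).filter (fun p => pvLt p pivot))).length
        < ((pivot :: rest).filter (fun p => !pvLt p pivot && !pvLt pivot p)).length := by omega
    rw [pvQsel, if_neg hlt', if_pos hnle',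
      pvSel_partition (pivot :: rest) pivot,
      List.getD_append_right _ _ _ _ (by omega),
      List.getD_append _ _ _ _ hidx,
      List.getD_eq_getElem _ _ hidx]
    exact (pvEq_filter_eq (pivot :: rest) pivot _ (List.getElem_mem hidx)).symm
  | case4 k pivot rest less hlt greater nle hnle ih =>
    have hlt' : ¬ k < ((pivot :: rest).filter (fun p => pvLt p pivot)).length := hlt
    have hnle' : ¬ k < (pivot :: rest).length
        - ((pivot :: rest).filter (fun p => pvLt pivot p)).length := hnle
    have hlens := (pvPartition_perm (pivot :: rest) pivot).length_eq
    simp only [List.length_append] at hlens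
    have hL : (pvSel ((pivot :: rest).filter (fun p => pvLt p pivot))).length
        = ((pivot :: rest).filter (fun p => pvLt p pivot)).length := (pvSel_perm _).length_eq
    have hkg : k - ((pivot :: rest).length
        - ((pivot :: rest).filter (fun p => pvLt pivot p)).length)
        < ((pivot :: rest).filter (fun p => pvLt pivot p)).length := by omega
    have hnle_eq : nle = (pivot :: rest).length
        - ((pivot :: rest).filter (fun p => pvLt pivot p)).length := rfl
    rw [pvQsel, if_neg hlt', if_neg hnle', ih hkg,
      pvSel_partition (pivot :: rest) pivot,
      List.getD_append_right _ _ _ _ (by omega),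
      List.getD_append_right _ _ _ _ (by omega)]
    congr 1
    omega

-- the two ports build the same list of pixel triples
theorem pvZip_eq (r g b : List Int) (hg : r.length ≤ g.length) (hb : r.length ≤ b.length) :
    r.zip (g.zip b) =
      (List.range r.length).map (fun i => (r.getD i 0, g.getD i 0, b.getD i 0)) := by
  apply List.ext_getElem
  · simp [List.length_zip]; omega
  · intro i h1 h2
    have hir : i < r.length := by simp [List.length_zip] at h1; omega
    simp only [List.getElem_zip, List.getElem_map, List.getElem_range]
    rw [List.getD_eq_getElem r 0 hir, List.getD_eq_getElem g 0 (by omega),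
      List.getD_eq_getElem b 0 (by omega)]

-- ===== VERDICT (by name: the statement is the Claim_ definition above) =====
theorem lexicographical_ordering_spec : Claim_equal_lexicographical_ordering := by
  intro red green blue _ hpre
  obtain ⟨hne, hg, hb⟩ := hpre
  unfold Spec_lexicographical_ordering
  have hr0 : 0 < red.length := List.length_pos_iff.mpr hne
  unfold lexicographical_ordering lexicographical_ordering_alt
  simp only [PySem.List.foldl_append_singleton_eq_map, List.nil_append]
  rw [pvZip_eq red green blue hg hb]
  set P := (List.range red.length).map
    (fun i => (red.getD i 0, green.getD i 0, blue.getD i 0)) with hP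
  have hPlen : P.length = red.length := by rw [hP]; simp
  have houter : (List.range P.length).foldl
      (fun pix i => (List.range' (i + 1) (P.length - (i + 1))).foldl
        (fun pix j => pvSwapStep pix i j) pix) P
      = pvSel P := by
    have := pvOuter_spec P [] P.length (by simp)
    simpa [List.range_eq_range'] using this
  rw [houter, (pvSel_perm P).length_eq,
    pvQsel_eq_sel P (P.length / 2) (Nat.div_lt_self (by omega) (by norm_num))]
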